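-- pv_equiv track=rewrite | github.com/davidkurasov/Horoscope_Bot | dv.py | build_day_keyboard
-- ===== SOURCE A (Python) =====
-- def build_day_keyboard(month):
--     keyboard = []
--     sub_keyboard = []
--     if month in ['Jan', 'Mar', 'May', 'Jul', 'Aug', 'Oct', 'Dec']:
--         for i in range(1,32):
--             if len(sub_keyboard) == 7:
--                 keyboard.append(sub_keyboard)
--                 sub_keyboard = []
--             elif i == 31:
--                 keyboard.append(sub_keyboard)
--             sub_keyboard.append(str(i))
--     elif month == 'Feb':
--         for i in range(1,30):
--             if len(sub_keyboard) == 5: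
--                 keyboard.append(sub_keyboard)
--                 sub_keyboard = []
--             elif i == 29:
--                 keyboard.append(sub_keyboard)
--             sub_keyboard.append(str(i))
--     else:
--         for i in range(1,31):
--             if len(sub_keyboard) == 7:
--                 keyboard.append(sub_keyboard)
--                 sub_keyboard = []
--             elif i == 30:
--                 keyboard.append(sub_keyboard)
--             sub_keyboard.append(str(i))
--     return keyboard
-- ===== SOURCE B (Python) =====
-- def build_day_keyboard(month):
--     # Note: in the original, the last day is appended into the row AFTER that row
--     # has been appended to the keyboard (same list object), so the last day IS present.
--     if month in ('Jan', 'Mar', 'May', 'Jul', 'Aug', 'Oct', 'Dec'):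
--         count, row = 31, 7
--     elif month == 'Feb':
--         count, row = 29, 5
--     else:
--         count, row = 30, 7
--     nums = [str(i) for i in range(1, count + 1)]
--     return [nums[j:j + row] for j in range(0, count, row)]
-- ===== Notes on version B (the rewrite author's own statement) =====
-- stated objective: simpler
-- what changed: Replaces the stateful accumulator loop (sub_keyboard with len==7/5 checks and the aliased last-day append) with a two-phase build: a flat list of day strings sliced into fixed-size chunks.
import Mathlib
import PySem

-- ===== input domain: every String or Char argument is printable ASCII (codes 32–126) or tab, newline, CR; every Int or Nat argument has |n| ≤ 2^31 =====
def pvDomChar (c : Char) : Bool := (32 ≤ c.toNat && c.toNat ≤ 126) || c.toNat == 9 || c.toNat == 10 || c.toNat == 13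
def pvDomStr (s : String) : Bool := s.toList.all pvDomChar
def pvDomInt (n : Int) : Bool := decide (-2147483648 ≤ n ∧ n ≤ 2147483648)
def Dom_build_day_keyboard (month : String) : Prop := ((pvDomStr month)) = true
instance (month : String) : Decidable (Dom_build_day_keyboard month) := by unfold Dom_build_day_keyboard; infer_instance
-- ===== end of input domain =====

-- B builds the grid as a flat day list sliced into fixed-size chunks instead of A's stateful accumulator loop (objective: simpler).


-- ===== PORT A =====
-- A's loop mutates sub_keyboard AFTER appending it to keyboard on the last day
-- (Python aliasing): modelled by the flag `f` -- when set, the keyboard's last row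
-- is the still-growing sub_keyboard, materialised after the fold. Step for step otherwise.
def pvStepA (limit last : Int) (st : List (List String) × List String × Bool) (i : Int) :
    List (List String) × List String × Bool :=
  let (kb, sub, f) := st
  if (sub.length : Int) = limit then (kb ++ [sub], [PySem.Int.toStr i], f)
  else if i = last then (kb, sub ++ [PySem.Int.toStr i], true)
  else (kb, sub ++ [PySem.Int.toStr i], f)

def pvLoopA (stop limit last : Int) : List (List String) :=
  let r := (PySem.List.pyRange 1 stop 1).foldl (pvStepA limit last) ([], [], false)
  if r.2.2 then r.1 ++ [r.2.1] else r.1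

def build_day_keyboard (month : String) : List (List String) :=
  if month ∈ (["Jan", "Mar", "May", "Jul", "Aug", "Oct", "Dec"] : List String) then
    pvLoopA 32 7 31
  else if month = "Feb" then
    pvLoopA 30 5 29
  else
    pvLoopA 31 7 30

-- ===== PORT B =====
def build_day_keyboard_alt (month : String) : List (List String) :=
  let cr : Int × Int :=
    if month ∈ (["Jan", "Mar", "May", "Jul", "Aug", "Oct", "Dec"] : List String) then (31, 7)
    else if month = "Feb" then (29, 5)
    else (30, 7)
  let nums := (PySem.List.pyRange 1 (cr.1 + 1) 1).map PySem.Int.toStr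
  (PySem.List.pyRange 0 cr.1 cr.2).map (fun j => PySem.List.slice nums (some j) (some (j + cr.2)))

-- ===== PRECONDITION & SPEC =====
def Spec_build_day_keyboard (month : String) (out : List (List String)) : Prop := out = build_day_keyboard_alt month
instance (month : String) (out : List (List String)) : Decidable (Spec_build_day_keyboard month out) := by unfold Spec_build_day_keyboard; infer_instance

-- ===== CLAIM (what is proved, stated in full; the proofs are below) =====
def Claim_equal_build_day_keyboard : Prop := ∀ (month : String), Dom_build_day_keyboard month → Spec_build_day_keyboard month (build_day_keyboard month)

-- ===== LEMMAS AND PROOFS =====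

-- ===== VERDICT (by name: the statement is the Claim_ definition above) =====
theorem build_day_keyboard_spec : Claim_equal_build_day_keyboard := by
  intro month _
  unfold Spec_build_day_keyboard build_day_keyboard build_day_keyboard_alt
  by_cases h1 : month ∈ (["Jan", "Mar", "May", "Jul", "Aug", "Oct", "Dec"] : List String)
  · simp only [if_pos h1]; decide
  · rw [if_neg h1, if_neg h1]
    by_cases h2 : month = "Feb"
    · simp only [if_pos h2]; decide
    · simp only [if_neg h2]; decide
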